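-- pv_equiv track=rewrite | github.com/bitwisecook/tcl-lsp | core/compiler/lowering.py | _collapse_continuations
-- ===== SOURCE A (Python) =====
-- def _collapse_continuations(text: str) -> str:
--     """Collapse ``\\<newline><whitespace>`` sequences to a single space.
--
--     Inside braces, Tcl preserves ``\\<newline>`` literally, but when
--     the brace-quoted string is later evaluated as a script (e.g. a
--     proc body), the evaluator collapses them.  We perform that
--     collapsing here, before lowering/codegen.
--     """
--     if "\\\n" not in text:
--         return text
--     out: list[str] = []
--     i = 0
--     n = len(text)
--     while i < n:
--         c = text[i]
--         if c == "\\" and i + 1 < n and text[i + 1] == "\n":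
--             i += 2
--             while i < n and text[i] in " \t":
--                 i += 1
--             out.append(" ")
--             continue
--         out.append(c)
--         i += 1
--     return "".join(out)
-- ===== SOURCE B (Python) =====
-- def _collapse_continuations(text: str) -> str:
--     if "\\\n" not in text:
--         return text
--     parts = text.split("\\\n")
--     return parts[0] + "".join(" " + p.lstrip(" \t") for p in parts[1:])
-- ===== Notes on version B (the rewrite author's own statement) =====
-- stated objective: simpler
-- what changed: Replaces the index-based character-by-character scan (with an inner whitespace-skipping while loop) by splitting the text on the backslash-newline separator, lstripping each subsequent segment and joining the segments with single spaces.
import Mathlib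
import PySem

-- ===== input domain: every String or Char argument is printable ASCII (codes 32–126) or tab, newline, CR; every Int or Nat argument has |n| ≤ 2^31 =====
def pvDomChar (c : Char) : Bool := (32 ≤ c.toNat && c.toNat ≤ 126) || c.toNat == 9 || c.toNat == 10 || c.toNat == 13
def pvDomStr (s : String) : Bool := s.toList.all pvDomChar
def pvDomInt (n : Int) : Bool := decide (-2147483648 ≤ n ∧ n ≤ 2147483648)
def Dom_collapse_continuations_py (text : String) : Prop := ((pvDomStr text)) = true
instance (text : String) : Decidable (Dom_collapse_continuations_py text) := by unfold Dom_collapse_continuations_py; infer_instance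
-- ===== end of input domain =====

-- B replaces A's index-based character scan by split-on-"\\\n" / lstrip / join over segments (simpler decomposition, same O(n) cost).

-- shared helper: Python's `"\\\n" in text` membership test, scanned left to right
def pvContainsBsNl : List Char → Bool
  | '\\' :: '\n' :: _ => true
  | _ :: rest => pvContainsBsNl rest
  | [] => false

-- shared helper: skip leading spaces/tabs (A's inner `while text[i] in " \t"` loop; B's `lstrip(" \t")`)
def pvSkipWs : List Char → List Char
  | [] => []
  | c :: r => if c = ' ' ∨ c = '\t' then pvSkipWs r else c :: r

theorem pvSkipWs_length_le (l : List Char) : (pvSkipWs l).length ≤ l.length := by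
  induction l with
  | nil => simp [pvSkipWs]
  | cons c r ih => simp only [pvSkipWs]; split <;> simp <;> omega

-- ===== PORT A =====
-- A's while loop over the characters: on "\\\n" skip both, skip following spaces/tabs, emit one ' '
def pvLoopA : List Char → List Char
  | '\\' :: '\n' :: rest => ' ' :: pvLoopA (pvSkipWs rest)
  | c :: rest => c :: pvLoopA rest
  | [] => []
termination_by l => l.length
decreasing_by
  · have := pvSkipWs_length_le rest; simp; omega
  · simp

def collapse_continuations_py (text : String) : String :=
  if pvContainsBsNl text.toList then String.mk (pvLoopA text.toList) else text

-- ===== PORT B =====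
-- Python's text.split("\\\n"): list of segments between occurrences of the two-char separator
def pvSplitBsNl : List Char → List (List Char)
  | '\\' :: '\n' :: rest => [] :: pvSplitBsNl rest
  | c :: rest =>
    match pvSplitBsNl rest with
    | p :: ps => (c :: p) :: ps
    | [] => [[c]]
  | [] => [[]]

-- parts[0] + "".join(" " + p.lstrip(" \t") for p in parts[1:])
def collapse_continuations_py_alt (text : String) : String :=
  if pvContainsBsNl text.toList then
    let parts := pvSplitBsNl text.toList
    String.mk (parts.headD [] ++ (parts.drop 1).flatMap (fun p => ' ' :: pvSkipWs p))
  else text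

-- ===== PRECONDITION & SPEC =====
def Spec_collapse_continuations_py (text : String) (out : String) : Prop := out = collapse_continuations_py_alt text
instance (text : String) (out : String) : Decidable (Spec_collapse_continuations_py text out) := by unfold Spec_collapse_continuations_py; infer_instance

-- ===== CLAIM (what is proved, stated in full; the proofs are below) =====
def Claim_equal_collapse_continuations_py : Prop := ∀ (text : String), Dom_collapse_continuations_py text → Spec_collapse_continuations_py text (collapse_continuations_py text)

-- ===== LEMMAS AND PROOFS =====

theorem pvSplitBsNl_ne_nil (l : List Char) : pvSplitBsNl l ≠ [] := by
  induction l using pvSplitBsNl.induct with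
  | case1 rest ih => simp [pvSplitBsNl]
  | case2 c rest h p ps hps ih => simp [pvSplitBsNl, hps]
  | case3 c rest h hnil ih => simp [pvSplitBsNl, hnil]
  | case4 => simp [pvSplitBsNl]

-- stripping leading spaces/tabs strips the head segment and leaves the rest
theorem pvSplit_skipWs (l : List Char) :
    pvSplitBsNl (pvSkipWs l) = pvSkipWs ((pvSplitBsNl l).headD []) :: (pvSplitBsNl l).drop 1 := by
  induction l using pvSplitBsNl.induct with
  | case1 rest ih =>
    simp [pvSkipWs, pvSplitBsNl]
  | case2 c rest h p ps hps ih =>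
    by_cases hws : c = ' ' ∨ c = '\t'
    · have hc : pvSkipWs (c :: rest) = pvSkipWs rest := by simp [pvSkipWs, hws]
      rw [hc, ih]
      simp [pvSplitBsNl, hps, pvSkipWs, hws]
    · have hc : pvSkipWs (c :: rest) = c :: rest := by simp [pvSkipWs, hws]
      rw [hc]
      simp [pvSplitBsNl, hps, pvSkipWs, hws]
  | case3 c rest h hnil ih => exact absurd hnil (pvSplitBsNl_ne_nil rest)
  | case4 => simp [pvSkipWs, pvSplitBsNl]

theorem pvLoopA_eq_join (l : List Char) :
    pvLoopA l = (pvSplitBsNl l).headD [] ++ ((pvSplitBsNl l).drop 1).flatMap (fun p => ' ' :: pvSkipWs p) := by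
  induction l using pvLoopA.induct with
  | case1 rest ih =>
    obtain ⟨p, ps, hps⟩ := List.exists_cons_of_ne_nil (pvSplitBsNl_ne_nil rest)
    rw [show pvLoopA ('\\' :: '\n' :: rest) = ' ' :: pvLoopA (pvSkipWs rest) from by simp [pvLoopA]]
    rw [ih, pvSplit_skipWs, hps]
    simp [pvSplitBsNl, hps]
  | case2 c rest h ih =>
    obtain ⟨p, ps, hps⟩ := List.exists_cons_of_ne_nil (pvSplitBsNl_ne_nil rest)
    have hstep : pvLoopA (c :: rest) = c :: pvLoopA rest := by
      rw [pvLoopA.eq_def]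
      split
      · rename_i heq; injection heq with h1 h2; exact absurd (h _ h1 h2) (fun f => f)
      · rename_i heq; injection heq with h1 h2; rw [h1, h2]
      · rename_i heq; exact absurd heq (List.cons_ne_nil _ _)
    rw [hstep, ih]
    simp [pvSplitBsNl, hps]
  | case3 => simp [pvLoopA, pvSplitBsNl]

-- ===== VERDICT (by name: the statement is the Claim_ definition above) =====
theorem collapse_continuations_py_spec : Claim_equal_collapse_continuations_py := by
  intro text _
  unfold Spec_collapse_continuations_py collapse_continuations_py collapse_continuations_py_alt
  by_cases h : pvContainsBsNl text.toList
  · simp [h, pvLoopA_eq_join]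
  · simp [h]
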